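-- pv_equiv track=rewrite | github.com/lengel93/SchoolWork | CSC_461_ProgrammingLanguages/Program_1_FileManipulation_Python/funct.py | strFromInt
-- ===== SOURCE A (Python) =====
-- def strFromInt ( number, numDigits ):
--     '''
--     Author: Kenneth Petry
--     Description:
--         Gets a string with the number specified from an integer.  The number will takes
--         the number of digits specified in numDigits.  Leading 0's will be applied if needed.
--         Helper funciton for numberFiles.
--
--     variables:
--         number = number to convert into a string
--         numDigits = number of digits, will apply leading 0's if needed
--     '''
--     result = ""
--     while number > 0:   # number assumed to fit in the number of digits specified
--         result = str( number % 10 ) + result    # get last digit and add to string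
--         number = number // 10   # shift the number (base 10) to the right
--         numDigits -= 1
--
--     # if leading 0's are needed,
--     while numDigits > 0:
--         result = '0' + result
--         numDigits -= 1
--
--     return result
-- ===== SOURCE B (Python) =====
-- def strFromInt(number, numDigits):
--     # Same result as the digit-by-digit loop: str() builds the digits,
--     # zfill pads with leading zeros (and never truncates an over-long number).
--     if number <= 0:
--         return '0' * numDigits
--     return str(number).zfill(numDigits)
-- ===== Notes on version B (the rewrite author's own statement) =====
-- stated objective: faster
-- what changed: Replaces both hand-written while-loops (remainder/floor-division digit extraction and one-by-one zero prepending) with a single library conversion str(number).zfill(numDigits), returning '0'*numDigits directly when number <= 0.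
import Mathlib
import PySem

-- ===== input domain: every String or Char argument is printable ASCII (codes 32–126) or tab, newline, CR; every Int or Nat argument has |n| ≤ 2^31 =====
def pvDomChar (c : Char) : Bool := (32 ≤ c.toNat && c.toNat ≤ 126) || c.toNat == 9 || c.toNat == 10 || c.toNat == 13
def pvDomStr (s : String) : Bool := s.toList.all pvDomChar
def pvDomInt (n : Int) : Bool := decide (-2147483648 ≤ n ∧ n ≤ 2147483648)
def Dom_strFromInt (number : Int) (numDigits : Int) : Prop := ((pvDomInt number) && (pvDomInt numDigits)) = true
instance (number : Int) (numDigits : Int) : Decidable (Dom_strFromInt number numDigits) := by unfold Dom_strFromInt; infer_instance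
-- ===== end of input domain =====

-- B replaces A's two digit/padding while-loops with one library conversion (str + zfill); same result, idiomatic.


-- ===== PORT A =====
-- first while-loop: extract digits with % 10 and // 10, prepending each to the result
def strFromIntLoop1 (number : Int) (numDigits : Int) (result : List Char) : List Char × Int :=
  if h : 0 < number then
    strFromIntLoop1 (PySem.Int.floordiv number 10) (numDigits - 1)
      (PySem.Int.toChars (PySem.Int.mod number 10) ++ result)
  else
    (result, numDigits)
termination_by number.toNat
decreasing_by
  have hc : number = ((number.toNat : Nat) : Int) := by omega
  have h1 : PySem.Int.floordiv number 10 = ((number.toNat / 10 : Nat) : Int) := by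
    rw [hc]; exact_mod_cast PySem.Int.floordiv_natCast number.toNat 10
  have h2 : number.toNat / 10 < number.toNat :=
    Nat.div_lt_self (by omega) (by omega)
  rw [h1]; omega

-- second while-loop: prepend '0' while numDigits > 0
def strFromIntLoop2 (numDigits : Int) (result : List Char) : List Char :=
  if h : 0 < numDigits then
    strFromIntLoop2 (numDigits - 1) ('0' :: result)
  else
    result
termination_by numDigits.toNat
decreasing_by omega

def strFromInt (number : Int) (numDigits : Int) : String :=
  let p := strFromIntLoop1 number numDigits []
  String.ofList (strFromIntLoop2 p.2 p.1)

-- ===== PORT B =====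
def strFromInt_alt (number : Int) (numDigits : Int) : String :=
  if number ≤ 0 then
    String.ofList (List.replicate numDigits.toNat '0')   -- '0' * numDigits ('' when numDigits ≤ 0)
  else
    PySem.Str.zfill (PySem.Int.toStr number) numDigits   -- str(number).zfill(numDigits)

-- ===== PRECONDITION & SPEC =====
def Spec_strFromInt (number : Int) (numDigits : Int) (out : String) : Prop := out = strFromInt_alt number numDigits
instance (number : Int) (numDigits : Int) (out : String) : Decidable (Spec_strFromInt number numDigits out) := by unfold Spec_strFromInt; infer_instance

-- ===== CLAIM (what is proved, stated in full; the proofs are below) =====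
def Claim_equal_strFromInt : Prop := ∀ (number : Int) (numDigits : Int), Dom_strFromInt number numDigits → Spec_strFromInt number numDigits (strFromInt number numDigits)

-- ===== LEMMAS AND PROOFS =====

-- toDigitsCore accumulates: the accumulator is appended on the right
lemma toDigitsCore_acc (f : Nat) : ∀ (n : Nat) (ds : List Char),
    Nat.toDigitsCore 10 f n ds = Nat.toDigitsCore 10 f n [] ++ ds := by
  induction f with
  | zero => intro n ds; simp [Nat.toDigitsCore]
  | succ f ih =>
    intro n ds
    simp only [Nat.toDigitsCore]
    by_cases h : n / 10 = 0
    · simp [h]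
    · simp only [h, if_false]
      rw [ih (n / 10) ((n % 10).digitChar :: ds), ih (n / 10) [(n % 10).digitChar]]
      simp

-- any fuel larger than n computes the same digits
lemma toDigitsCore_fuel (f : Nat) : ∀ (f' n : Nat), n < f → n < f' →
    Nat.toDigitsCore 10 f n [] = Nat.toDigitsCore 10 f' n [] := by
  induction f with
  | zero => intro f' n h; omega
  | succ f ih =>
    intro f' n hf hf'
    cases f' with
    | zero => omega
    | succ f' =>
      simp only [Nat.toDigitsCore]
      by_cases h : n / 10 = 0
      · simp [h]
      · simp only [h, if_false]
        rw [toDigitsCore_acc f, toDigitsCore_acc f']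
        have hn : 0 < n := by omega
        have : n / 10 < n := Nat.div_lt_self hn (by omega)
        rw [ih f' (n / 10) (by omega) (by omega)]

lemma toDigits_of_lt (m : Nat) (h : m < 10) : Nat.toDigits 10 m = [Nat.digitChar m] :=
  Nat.toDigits_of_lt_base h

lemma toDigits_step (m : Nat) (h : 10 ≤ m) :
    Nat.toDigits 10 m = Nat.toDigits 10 (m / 10) ++ [Nat.digitChar (m % 10)] := by
  have h0 : m / 10 ≠ 0 := by omega
  show Nat.toDigitsCore 10 (m + 1) m [] = _
  simp only [Nat.toDigitsCore, h0, if_false]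
  rw [toDigitsCore_acc m]
  have : m / 10 < m := Nat.div_lt_self (by omega) (by omega)
  rw [toDigitsCore_fuel m (m / 10 + 1) (m / 10) (by omega) (by omega)]
  rfl

-- characterisation of A's first loop for a positive number
lemma loop1_pos (n : Nat) (hn : 0 < n) : ∀ (d : Int) (res : List Char),
    strFromIntLoop1 (n : Int) d res =
      (Nat.toDigits 10 n ++ res, d - (Nat.toDigits 10 n).length) := by
  induction n using Nat.strong_induction_on with
  | _ n ih =>
    intro d res
    rw [strFromIntLoop1]
    have hpos : (0 : Int) < (n : Int) := by exact_mod_cast hn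
    simp only [hpos, dif_pos]
    have hfd : PySem.Int.floordiv (n : Int) 10 = ((n / 10 : Nat) : Int) := by
      exact_mod_cast PySem.Int.floordiv_natCast n 10
    have hmd : PySem.Int.mod (n : Int) 10 = ((n % 10 : Nat) : Int) := by
      exact_mod_cast PySem.Int.mod_natCast n 10
    rw [hfd, hmd]
    have hmod : PySem.Int.toChars ((n % 10 : Nat) : Int) = [Nat.digitChar (n % 10)] := by
      rw [PySem.Int.toChars, if_neg (by omega), Int.toNat_natCast,
        toDigits_of_lt (n % 10) (Nat.mod_lt n (by omega))]
    rw [hmod, List.singleton_append]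
    by_cases h : n / 10 = 0
    · have hlt : n < 10 := by omega
      rw [h]
      rw [strFromIntLoop1]
      simp only [Nat.cast_zero, lt_self_iff_false, dif_neg, not_false_iff]
      rw [toDigits_of_lt n hlt, Nat.mod_eq_of_lt hlt]
      simp
    · have hsub : n / 10 < n := Nat.div_lt_self hn (by omega)
      rw [ih (n / 10) hsub (by omega) (d - 1) (Nat.digitChar (n % 10) :: res)]
      rw [toDigits_step n (by omega)]
      simp only [List.append_assoc, List.singleton_append, List.length_append,
        List.length_cons, List.length_nil, Prod.mk.injEq]
      refine ⟨trivial, by push_cast; omega⟩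

-- characterisation of A's second loop
lemma loop2_eq (d : Int) : ∀ (res : List Char),
    strFromIntLoop2 d res = List.replicate d.toNat '0' ++ res := by
  by_cases hd : 0 < d
  · have hk : d.toNat = (d - 1).toNat + 1 := by omega
    intro res
    rw [strFromIntLoop2]
    simp only [hd, dif_pos]
    rw [loop2_eq (d - 1) ('0' :: res), hk, List.replicate_succ']
    simp
  · intro res
    rw [strFromIntLoop2]
    have : d.toNat = 0 := by omega
    simp [hd, this]
termination_by d.toNat
decreasing_by omega

lemma digitChar_ne_sign (m : Nat) (hm : m < 10) : Nat.digitChar m ≠ '+' ∧ Nat.digitChar m ≠ '-' := by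
  interval_cases m <;> exact ⟨by decide, by decide⟩

lemma toDigits_mem_ne_sign (n : Nat) : ∀ c ∈ Nat.toDigits 10 n, c ≠ '+' ∧ c ≠ '-' := by
  induction n using Nat.strong_induction_on with
  | _ n ih =>
    by_cases h : n < 10
    · rw [toDigits_of_lt n h]
      intro c hc
      simp at hc
      subst hc
      exact digitChar_ne_sign n h
    · rw [toDigits_step n (by omega)]
      intro c hc
      rcases List.mem_append.mp hc with h1 | h1
      · exact ih (n / 10) (Nat.div_lt_self (by omega) (by omega)) c h1
      · simp at h1; subst h1; exact digitChar_ne_sign (n % 10) (Nat.mod_lt n (by omega))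

lemma toDigits_ne_nil (n : Nat) : Nat.toDigits 10 n ≠ [] := by
  by_cases h : n < 10
  · rw [toDigits_of_lt n h]; simp
  · rw [toDigits_step n (by omega)]; simp

-- ===== VERDICT (by name: the statement is the Claim_ definition above) =====
theorem strFromInt_spec : Claim_equal_strFromInt := by
  intro number numDigits _
  unfold Spec_strFromInt strFromInt strFromInt_alt
  by_cases hn : number ≤ 0
  · -- A's first loop does nothing; the second pads with zeros
    rw [strFromIntLoop1]
    simp only [show ¬ (0 < number) by omega, dif_neg, not_false_iff, hn, if_pos]
    rw [loop2_eq]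
    simp
  · -- number > 0: the digit loop produces str(number), the pad loop is zfill
    have hpos : 0 < number := by omega
    have hcast : number = ((number.toNat : Nat) : Int) := by omega
    have hnat : 0 < number.toNat := by omega
    rw [hcast, loop1_pos number.toNat hnat numDigits []]
    rw [if_neg (show ¬ ((number.toNat : Nat) : Int) ≤ 0 by omega)]
    show String.ofList (strFromIntLoop2
        (numDigits - ((Nat.toDigits 10 number.toNat).length : Int))
        (Nat.toDigits 10 number.toNat ++ [])) = _
    rw [loop2_eq, List.append_nil]
    have htl : (PySem.Int.toStr ((number.toNat : Nat) : Int)).toList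
        = Nat.toDigits 10 number.toNat := by
      simp [PySem.Int.toStr, PySem.Int.toChars]
      congr 1
      omega
    rcases hcs : Nat.toDigits 10 number.toNat with _ | ⟨c, rest⟩
    · exact absurd hcs (toDigits_ne_nil number.toNat)
    rw [hcs] at htl
    have hc : c ≠ '+' ∧ c ≠ '-' := by
      apply toDigits_mem_ne_sign number.toNat
      rw [hcs]; simp
    rw [PySem.Str.zfill, htl]
    congr 1
    by_cases hw : numDigits ≤ ((c :: rest).length : Int)
    · have hw' : numDigits ≤ (rest.length : Int) + 1 := by simpa using hw
      have hz : PySem.Chars.zfill (c :: rest) numDigits = c :: rest := by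
        simp [PySem.Chars.zfill]
        intro h2
        exfalso
        omega
      have h0 : (numDigits - ((c :: rest).length : Int)).toNat = 0 := by
        simp only [List.length_cons]; push_cast; omega
      rw [hz, h0]
      simp
    · have hw' : ¬ numDigits ≤ (rest.length : Int) + 1 := by simpa using hw
      have hz : PySem.Chars.zfill (c :: rest) numDigits
          = List.replicate (numDigits.toNat - (c :: rest).length) '0' ++ (c :: rest) := by
        simp [PySem.Chars.zfill, hc.1, hc.2]
        intro h2
        exfalso
        omega
      have h0 : (numDigits - ((c :: rest).length : Int)).toNat
          = numDigits.toNat - (c :: rest).length := by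
        simp only [List.length_cons]; push_cast; omega
      rw [hz, h0]
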